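-- pv_equiv track=rewrite | github.com/classywolves/clwo-ttt | py/bands_gen.py | get_lut
-- ===== SOURCE A (Python) =====
-- def get_lut(bands : list) -> list:
--     lut = []
--     for i in range(0, 100):
--         for j, b in enumerate(bands):
--             if i <= b:
--                 lut.append(j)
--                 break
--
--     return lut
-- ===== SOURCE B (Python) =====
-- def get_lut(bands : list) -> list:
--     ans = [None] * 100
--     for j in range(len(bands) - 1, -1, -1):
--         b = bands[j]
--         if b >= 0:
--             top = b if b < 99 else 99
--             for i in range(0, top + 1):
--                 ans[i] = j
--     return [v for v in ans if v is not None]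
-- ===== Notes on version B (the rewrite author's own statement) =====
-- stated objective: alternative
-- what changed: Instead of scanning the bands for the first match for each of the 100 indices, B builds a 100-slot table by iterating the bands from the last to the first and overwriting the prefix [0, min(b,99)] with each band's index, then filters out unset slots; each table cell is written at most once per band with no per-index rescans.
import Mathlib
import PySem

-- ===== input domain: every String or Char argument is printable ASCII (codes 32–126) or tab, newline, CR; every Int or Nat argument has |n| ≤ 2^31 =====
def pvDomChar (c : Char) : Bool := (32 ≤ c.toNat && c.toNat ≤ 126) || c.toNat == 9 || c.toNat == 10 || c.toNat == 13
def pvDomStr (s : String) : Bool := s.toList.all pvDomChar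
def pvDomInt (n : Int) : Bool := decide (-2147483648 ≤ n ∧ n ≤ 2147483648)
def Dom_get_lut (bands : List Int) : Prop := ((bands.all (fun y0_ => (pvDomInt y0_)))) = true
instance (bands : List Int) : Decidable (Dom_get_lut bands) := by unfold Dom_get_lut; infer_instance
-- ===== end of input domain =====

-- B replaces the per-index first-match scan by a back-to-front table fill (alternative decomposition, same cost).

-- ===== PORT A =====
-- inner 'for j, b in enumerate(bands): if i <= b: append j; break' = first matching index, or none
def innerA (i : Int) : List (Int × Int) → Option Int
  | [] => none
  | (j, b) :: rest => if i ≤ b then some j else innerA i rest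

def get_lut (bands : List Int) : List Int :=
  (PySem.List.pyRange 0 100 1).foldl (fun lut i =>
    match innerA i (PySem.List.enumerate bands) with
    | some j => lut ++ [j]
    | none => lut) []

-- ===== PORT B =====
def get_lut_alt (bands : List Int) : List Int :=
  let ans : List (Option Int) := List.replicate 100 none
  let ans := (PySem.List.pyRange ((bands.length : Int) - 1) (-1) (-1)).foldl (fun ans j =>
    -- b = bands[j]; j is always a valid nonnegative index here, so pyGetD is exact
    let b := PySem.List.pyGetD bands j 0
    if b ≥ 0 then
      let top := if b < 99 then b else 99
      (PySem.List.pyRange 0 (top + 1) 1).foldl (fun ans i => ans.set i.toNat (some j)) ans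
    else ans) ans
  ans.filterMap id

-- ===== PRECONDITION & SPEC =====
def Spec_get_lut (bands : List Int) (out : List Int) : Prop := out = get_lut_alt bands
instance (bands : List Int) (out : List Int) : Decidable (Spec_get_lut bands out) := by unfold Spec_get_lut; infer_instance

-- ===== CLAIM (what is proved, stated in full; the proofs are below) =====
def Claim_equal_get_lut : Prop := ∀ (bands : List Int), Dom_get_lut bands → Spec_get_lut bands (get_lut bands)

-- ===== LEMMAS AND PROOFS =====

-- least index ≥ k (as an Int) whose band admits i, as computed by innerA on the dropped suffix
def firstFrom (bands : List Int) (k : Nat) (i : Int) : Option Int :=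
  innerA i (PySem.List.enumerate (bands.drop k) (k : Int))

theorem firstFrom_ge (bands : List Int) (k : Nat) (hk : bands.length ≤ k) (i : Int) :
    firstFrom bands k i = none := by
  simp [firstFrom, List.drop_eq_nil_of_le hk, PySem.List.enumerate, innerA]

theorem firstFrom_step (bands : List Int) (k : Nat) (hk : k < bands.length) (i : Int) :
    firstFrom bands k i =
      if i ≤ bands[k] then some (k : Int) else firstFrom bands (k + 1) i := by
  have h : bands.drop k = bands[k] :: bands.drop (k + 1) := List.drop_eq_getElem_cons hk
  simp only [firstFrom, h, PySem.List.enumerate_cons, innerA]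
  norm_cast

theorem flatMap_toList (l : List Int) (g : Int → Option Int) :
    l.flatMap (fun x => (g x).toList) = l.filterMap g := by
  induction l with
  | nil => rfl
  | cons x xs ih =>
    cases h : g x <;> simp [List.flatMap_cons, h, ih, List.filterMap_cons]

-- A-side characterization
theorem getLutA (bands : List Int) :
    get_lut bands = (List.range 100).filterMap (fun k : Nat => firstFrom bands 0 (k : Int)) := by
  unfold get_lut
  have hf : (fun (lut : List Int) (i : Int) =>
      match innerA i (PySem.List.enumerate bands) with
      | some j => lut ++ [j]
      | none => lut) =
      fun lut i => lut ++ (innerA i (PySem.List.enumerate bands)).toList := by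
    funext lut i; cases h : innerA i (PySem.List.enumerate bands) <;> simp [h]
  rw [hf, PySem.List.foldl_append_eq_flatMap, flatMap_toList, List.nil_append,
    PySem.List.pyRange_one]
  simp [List.filterMap_map, firstFrom, Function.comp]

-- setting one slot of a range-map
theorem set_range_map (n : Nat) (f : Nat → Option Int) (m : Nat) (v : Option Int) :
    ((List.range n).map f).set m v =
      (List.range n).map (fun i => if i = m then v else f i) := by
  apply List.ext_getElem?
  intro k
  rw [List.getElem?_set]
  by_cases hkm : m = k
  · subst hkm
    by_cases hm : m < n <;>
      simp [hm, List.getElem?_range, List.getElem?_map]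
  · by_cases hk : k < n <;>
      simp [hkm, hk, List.getElem?_range, List.getElem?_map, Ne.symm hkm]

-- filling a prefix of a range-map
theorem fill_prefix (f : Nat → Option Int) (v : Option Int) : ∀ (n : Nat),
    (PySem.List.pyRange 0 (n : Int) 1).foldl (fun l i => l.set i.toNat v)
        ((List.range 100).map f) =
      (List.range 100).map (fun i => if i < n then v else f i)
  | 0 => by simp [PySem.List.pyRange_one_eq_nil]
  | (n + 1) => by
    have hsp : PySem.List.pyRange 0 ((n + 1 : Nat) : Int) 1 =
        PySem.List.pyRange 0 (n : Int) 1 ++ [(n : Int)] := by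
      rw [show ((n + 1 : Nat) : Int) = (n : Int) + 1 by push_cast; ring]
      exact PySem.List.pyRange_one_succ_right (by positivity)
    rw [hsp, List.foldl_append, fill_prefix f v n, List.foldl_cons, List.foldl_nil,
      show ((n : Int)).toNat = n from Int.toNat_natCast n, set_range_map]
    apply List.map_congr_left
    intro i _
    by_cases h1 : i = n <;> by_cases h2 : i < n <;> simp [h1, h2] <;> omega

-- the invariant of B's outer loop
theorem fillB (bands : List Int) (k : Nat) (hk : k ≤ bands.length) :
    (PySem.List.pyRange ((bands.length : Int) - 1) ((k : Int) - 1) (-1)).foldl (fun ans j =>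
        let b := PySem.List.pyGetD bands j 0
        if b ≥ 0 then
          let top := if b < 99 then b else 99
          (PySem.List.pyRange 0 (top + 1) 1).foldl (fun ans i => ans.set i.toNat (some j)) ans
        else ans) (List.replicate 100 none) =
      (List.range 100).map (fun i : Nat => firstFrom bands k (i : Int)) := by
  induction' hd : bands.length - k with d ihd generalizing k
  · -- k = bands.length : empty countdown range
    have hkl : k = bands.length := by omega
    rw [PySem.List.pyRange_neg_one_eq_nil (by omega), List.foldl_nil]
    subst hkl
    have : ∀ i : Nat, firstFrom bands bands.length (i : Int) = none :=
      fun i => firstFrom_ge bands bands.length le_rfl _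
    simp [this, List.map_const', List.eq_replicate_iff]
  · -- k < bands.length : process index k last
    have hklt : k < bands.length := by omega
    have hsplit : PySem.List.pyRange ((bands.length : Int) - 1) ((k : Int) - 1) (-1) =
        PySem.List.pyRange ((bands.length : Int) - 1) (k : Int) (-1) ++ [(k : Int)] := by
      rw [PySem.List.pyRange_neg_one_eq_reverse, PySem.List.pyRange_neg_one_eq_reverse]
      have : PySem.List.pyRange ((k : Int) - 1 + 1) ((bands.length : Int) - 1 + 1) 1 =
          (k : Int) :: PySem.List.pyRange ((k : Int) + 1) ((bands.length : Int) - 1 + 1) 1 := by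
        have := PySem.List.pyRange_one_cons (a := ((k : Int) - 1 + 1))
          (b := ((bands.length : Int) - 1 + 1)) (by push_cast; omega)
        simpa using this
      rw [this, List.reverse_cons]
    have ihk := ihd (k + 1) (by omega) (by omega)
    have hk1 : ((k : Int) + 1 - 1) = ((k : Int) - 1 + 1 - 1) + 1 := by ring
    rw [hsplit, List.foldl_append]
    have ihk' : (PySem.List.pyRange ((bands.length : Int) - 1) (k : Int) (-1)).foldl (fun ans j =>
        let b := PySem.List.pyGetD bands j 0
        if b ≥ 0 then
          let top := if b < 99 then b else 99
          (PySem.List.pyRange 0 (top + 1) 1).foldl (fun ans i => ans.set i.toNat (some j)) ans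
        else ans) (List.replicate 100 none) =
        (List.range 100).map (fun i : Nat => firstFrom bands (k + 1) (i : Int)) := by
      have hc : ((k + 1 : Nat) : Int) - 1 = (k : Int) := by push_cast; ring
      rw [hc] at ihk
      exact ihk
    rw [ihk', List.foldl_cons, List.foldl_nil]
    have hget : PySem.List.pyGetD bands (k : Int) 0 = bands[k] := by
      rw [PySem.List.pyGetD_natCast]
      simp [hklt]
    simp only [hget]
    by_cases hb : bands[k] ≥ 0
    · -- fill [0, min(b,99)] with k
      set b := bands[k] with hbdef
      set top : Int := if b < 99 then b else 99 with htop
      have htop0 : 0 ≤ top := by rw [htop]; split <;> omega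
      have htop99 : top ≤ 99 := by rw [htop]; split <;> omega
      rw [if_pos hb,
        show top + 1 = (((top + 1).toNat : Nat) : Int) by omega, fill_prefix]
      apply List.map_congr_left
      intro i hi
      have hi100 : i < 100 := List.mem_range.mp hi
      rw [firstFrom_step bands k hklt]
      by_cases hib : (i : Int) ≤ b
      · have : i < (top + 1).toNat := by rw [htop]; split <;> omega
        simp [this, hib, ← hbdef]
      · have : ¬ i < (top + 1).toNat := by rw [htop]; split <;> omega
        simp [this, hib, ← hbdef]
    · -- negative band: nothing matches, nothing filled
      simp only [ge_iff_le, if_neg (by omega : ¬ (0 : Int) ≤ bands[k])]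
      apply List.map_congr_left
      intro i hi
      rw [firstFrom_step bands k hklt, if_neg]
      have h0 : (0 : Int) ≤ (i : Int) := Int.natCast_nonneg i
      omega

theorem getLutB (bands : List Int) :
    get_lut_alt bands = (List.range 100).filterMap (fun k : Nat => firstFrom bands 0 (k : Int)) := by
  have h := fillB bands 0 (Nat.zero_le _)
  simp only [Nat.cast_zero, zero_sub] at h
  simp only [get_lut_alt]
  rw [h, List.filterMap_map]
  rfl

-- ===== VERDICT (by name: the statement is the Claim_ definition above) =====
theorem get_lut_spec : Claim_equal_get_lut := by
  intro bands _
  unfold Spec_get_lut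
  rw [getLutA, getLutB]
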